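-- pv_equiv track=rewrite | github.com/bludiesel/sergas-agents | tests/security/test_authentication.py | _can_assign_role
-- ===== SOURCE A (Python) =====
-- def _can_assign_role(
--     current_roles: list,
--     new_role: str,
--     conflicting_roles: list
-- ) -> bool:
--     """Check if role can be assigned (segregation of duties)."""
--     for role1, role2 in conflicting_roles:
--         if role1 in current_roles and new_role == role2:
--             return False
--         if role2 in current_roles and new_role == role1:
--             return False
--     return True
-- ===== SOURCE B (Python) =====
-- def _can_assign_role(
--     current_roles: list,
--     new_role: str,
--     conflicting_roles: list
-- ) -> bool:
--     """Check if role can be assigned (segregation of duties)."""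
--     forbidden = set()
--     for role1, role2 in conflicting_roles:
--         if new_role == role2:
--             forbidden.add(role1)
--         if new_role == role1:
--             forbidden.add(role2)
--     return forbidden.isdisjoint(current_roles)
-- ===== Notes on version B (the rewrite author's own statement) =====
-- stated objective: faster
-- what changed: Instead of scanning current_roles once per conflicting pair with early returns, B builds in one pass the set of roles forbidden by new_role and then answers with a single disjointness query against current_roles.
import Mathlib
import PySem

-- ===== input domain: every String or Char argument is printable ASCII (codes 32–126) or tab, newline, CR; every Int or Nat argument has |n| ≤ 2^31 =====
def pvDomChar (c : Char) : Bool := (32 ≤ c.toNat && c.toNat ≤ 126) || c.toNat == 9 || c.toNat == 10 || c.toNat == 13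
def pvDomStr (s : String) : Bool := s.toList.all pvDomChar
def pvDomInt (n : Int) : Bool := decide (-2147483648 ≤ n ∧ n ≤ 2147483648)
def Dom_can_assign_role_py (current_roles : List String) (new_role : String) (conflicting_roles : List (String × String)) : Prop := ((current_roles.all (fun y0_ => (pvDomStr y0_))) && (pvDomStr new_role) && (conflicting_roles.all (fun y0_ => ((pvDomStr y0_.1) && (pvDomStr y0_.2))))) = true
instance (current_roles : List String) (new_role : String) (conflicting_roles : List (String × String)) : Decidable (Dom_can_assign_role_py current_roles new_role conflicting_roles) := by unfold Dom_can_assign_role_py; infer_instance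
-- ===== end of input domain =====

-- B builds a forbidden-role set once and answers with one disjointness query (alternative decomposition; return value proved equal to A).


-- ===== PORT A =====
-- Port of A: scan the pairs in order, returning False as soon as a conflict with a held role fires.
def can_assign_role_py (current_roles : List String) (new_role : String) (conflicting_roles : List (String × String)) : Bool :=
  match conflicting_roles with
  | [] => true
  | (role1, role2) :: rest =>
    if current_roles.contains role1 && new_role == role2 then false
    else if current_roles.contains role2 && new_role == role1 then false
    else can_assign_role_py current_roles new_role rest

-- ===== PORT B =====
-- Port of B: build the forbidden-role set in one pass, then one disjointness query.
def forbiddenRoles (new_role : String) (conflicting_roles : List (String × String)) : PySem.Set String :=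
  conflicting_roles.foldl (fun s p =>
    let s1 := if new_role == p.2 then PySem.Set.add s p.1 else s
    if new_role == p.1 then PySem.Set.add s1 p.2 else s1) PySem.Set.empty

def can_assign_role_py_alt (current_roles : List String) (new_role : String) (conflicting_roles : List (String × String)) : Bool :=
  PySem.Set.isdisjoint (forbiddenRoles new_role conflicting_roles) current_roles

-- ===== PRECONDITION & SPEC =====
def Spec_can_assign_role_py (current_roles : List String) (new_role : String) (conflicting_roles : List (String × String)) (out : Bool) : Prop := out = can_assign_role_py_alt current_roles new_role conflicting_roles
instance (current_roles : List String) (new_role : String) (conflicting_roles : List (String × String)) (out : Bool) : Decidable (Spec_can_assign_role_py current_roles new_role conflicting_roles out) := by unfold Spec_can_assign_role_py; infer_instance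

-- ===== CLAIM (what is proved, stated in full; the proofs are below) =====
def Claim_equal_can_assign_role_py : Prop := ∀ (current_roles : List String) (new_role : String) (conflicting_roles : List (String × String)), Dom_can_assign_role_py current_roles new_role conflicting_roles → Spec_can_assign_role_py current_roles new_role conflicting_roles (can_assign_role_py current_roles new_role conflicting_roles)

-- ===== LEMMAS AND PROOFS =====

def HasConflict (current_roles : List String) (new_role : String) (conflicting_roles : List (String × String)) : Prop :=
  ∃ p ∈ conflicting_roles, (p.1 ∈ current_roles ∧ new_role = p.2) ∨ (p.2 ∈ current_roles ∧ new_role = p.1)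

theorem a_iff_no_conflict (current_roles : List String) (new_role : String) (conflicting_roles : List (String × String)) :
    can_assign_role_py current_roles new_role conflicting_roles = true
      ↔ ¬ HasConflict current_roles new_role conflicting_roles := by
  induction conflicting_roles with
  | nil => simp [can_assign_role_py, HasConflict]
  | cons hd tl ih =>
    obtain ⟨r1, r2⟩ := hd
    simp only [can_assign_role_py, HasConflict, List.mem_cons] at *
    split_ifs with h1 h2 <;>
      simp_all

theorem mem_forbiddenRoles_aux (new_role : String) (cr : List (String × String)) (s : PySem.Set String) (r : String) :
    (r ∈ cr.foldl (fun s p =>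
      let s1 := if new_role == p.2 then PySem.Set.add s p.1 else s
      if new_role == p.1 then PySem.Set.add s1 p.2 else s1) s)
    ↔ r ∈ s ∨ ∃ p ∈ cr, (new_role = p.2 ∧ r = p.1) ∨ (new_role = p.1 ∧ r = p.2) := by
  induction cr generalizing s with
  | nil => simp
  | cons hd tl ih =>
    simp only [List.foldl_cons, ih, List.mem_cons]
    constructor
    · rintro (hmem | hp)
      · split_ifs at hmem <;> simp_all [PySem.Set.mem_add] <;> tauto
      · obtain ⟨p, hp, hc⟩ := hp; exact Or.inr ⟨p, Or.inr hp, hc⟩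
    · rintro (hmem | ⟨p, hp | hp, hc⟩)
      · left; split_ifs <;> simp [PySem.Set.mem_add, hmem]
      · subst hp; left; split_ifs <;> simp_all [PySem.Set.mem_add]
      · right; exact ⟨p, hp, hc⟩

theorem alt_iff_no_conflict (current_roles : List String) (new_role : String) (conflicting_roles : List (String × String)) :
    can_assign_role_py_alt current_roles new_role conflicting_roles = true
      ↔ ¬ HasConflict current_roles new_role conflicting_roles := by
  have hdis : can_assign_role_py_alt current_roles new_role conflicting_roles = true
      ↔ ∀ x ∈ forbiddenRoles new_role conflicting_roles, x ∉ current_roles := by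
    simp [can_assign_role_py_alt, pysem]
  rw [hdis]
  unfold forbiddenRoles
  constructor
  · intro h ⟨p, hp, hc⟩
    rcases hc with ⟨hm, he⟩ | ⟨hm, he⟩
    · exact h p.1 ((mem_forbiddenRoles_aux _ _ _ _).mpr (Or.inr ⟨p, hp, Or.inl ⟨he, rfl⟩⟩)) hm
    · exact h p.2 ((mem_forbiddenRoles_aux _ _ _ _).mpr (Or.inr ⟨p, hp, Or.inr ⟨he, rfl⟩⟩)) hm
  · intro h x hx hxc
    rcases (mem_forbiddenRoles_aux _ _ _ _).mp hx with hmem | ⟨p, hp, ⟨he, hr⟩ | ⟨he, hr⟩⟩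
    · simp [PySem.Set.empty] at hmem
    · exact h ⟨p, hp, Or.inl ⟨hr ▸ hxc, he⟩⟩
    · exact h ⟨p, hp, Or.inr ⟨hr ▸ hxc, he⟩⟩

-- ===== VERDICT (by name: the statement is the Claim_ definition above) =====
theorem can_assign_role_py_spec : Claim_equal_can_assign_role_py := by
  intro current_roles new_role conflicting_roles _
  unfold Spec_can_assign_role_py
  rw [Bool.eq_iff_iff, a_iff_no_conflict, alt_iff_no_conflict]
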